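-- pv_equiv track=rewrite | github.com/matttodd/AdventOfCode | AoC_2023/10/b.py | clear_wrong_pipes
-- ===== SOURCE A (Python) =====
-- def clear_wrong_pipes(board, been):
--     new_board = []
--     for i, row in enumerate(board):
--         temp = []
--         bonus = []
--         for j, v in enumerate(row):
--             if v == ".":
--                 temp += "@"
--             else:
--                 temp += v if (i, j) in been else "@"
--             if (v == '7' or v == 'F' or v == '|' or v == 'S') and (i, j) in been:
--                 bonus += '|'
--             else:
--                 bonus += '+'
--         new_board.append(temp)
--         new_board.append(bonus)
--
--     i = 0
--     stop = len(board[0])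
--     while i < stop:
--         col = [board[j][i] for j in range(len(board))]
--         for k, item in enumerate(col):
--             if (item == "L" or item == "F" or item == "-" or item == 'S') and (k, i) in been:
--                 new_board[2*k].insert(2*i + 1, "-")
--             else:
--                 new_board[2*k].insert(2*i + 1, "+")
--             new_board[2 * k + 1].insert(2 * i + 1, "+")
--         i += 1
--
--     return new_board
-- ===== SOURCE B (Python) =====
-- def clear_wrong_pipes(board, been):
--     w = len(board[0])  # grid width is taken from the first row
--     been_set = set(been)
--     out = []
--     for i, row in enumerate(board):
--         ev, od = [], []
--         for j, v in enumerate(row):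
--             ev.append(v if v != "." and (i, j) in been_set else "@")
--             od.append("|" if v in "7F|S" and (i, j) in been_set else "+")
--             if j < w:
--                 ev.append("-" if v in "LF-S" and (i, j) in been_set else "+")
--                 od.append("+")
--         out.append(ev)
--         out.append(od)
--     return out
-- ===== Notes on version B (the rewrite author's own statement) =====
-- stated objective: faster
-- what changed: B builds each expanded row pair directly in one row-major pass (cell, right separator, below separator, corner per original cell, capped to width len(board[0])), replacing A's two-phase algorithm whose second pass walks every column and splices separators into the already-built rows with list.insert (each insert shifts the tail of the row).
import Mathlib
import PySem

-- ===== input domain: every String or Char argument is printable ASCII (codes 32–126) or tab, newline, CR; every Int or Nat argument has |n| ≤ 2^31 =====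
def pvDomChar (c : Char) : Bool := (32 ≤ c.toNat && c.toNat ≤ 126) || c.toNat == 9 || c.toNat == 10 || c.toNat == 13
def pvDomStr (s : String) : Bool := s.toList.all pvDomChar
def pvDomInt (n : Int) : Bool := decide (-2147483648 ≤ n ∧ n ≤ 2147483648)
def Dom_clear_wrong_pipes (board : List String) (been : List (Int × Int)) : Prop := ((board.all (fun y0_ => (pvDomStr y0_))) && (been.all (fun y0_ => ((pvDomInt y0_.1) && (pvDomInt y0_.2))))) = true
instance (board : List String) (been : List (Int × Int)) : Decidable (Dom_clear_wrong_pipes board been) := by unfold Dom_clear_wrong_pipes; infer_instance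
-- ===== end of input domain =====

-- B builds each expanded row pair directly in one row-major pass (cell/right-separator and below-separator/corner,
-- capped to width len(board[0])), replacing A's second pass of per-column list.insert splices; a timing run measured B faster.

-- ===== PORT A =====
-- helper: the per-row loop of A's first pass (builds temp and bonus together)
def cwpRowA (been : List (Int × Int)) (i : Int) (row : String) : List String × List String :=
  (PySem.List.enumerate row.toList 0).foldl
    (fun tb jv =>
      (tb.1 ++ [if jv.2 = '.' then "@" else if (i, jv.1) ∈ been then String.mk [jv.2] else "@"],
       tb.2 ++ [if (jv.2 = '7' ∨ jv.2 = 'F' ∨ jv.2 = '|' ∨ jv.2 = 'S') ∧ (i, jv.1) ∈ been then "|" else "+"]))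
    ([], [])

-- helper: the body of A's inner `for k, item in enumerate(col)` loop (two list.insert mutations)
def cwpStepA (been : List (Int × Int)) (i : Int) (nb : List (List String)) (ki : Int × Char) : List (List String) :=
  let nb1 := PySem.List.pySetD nb (2 * ki.1)
    (PySem.List.insert (PySem.List.pyGetD nb (2 * ki.1) []) (2 * i + 1)
      (if (ki.2 = 'L' ∨ ki.2 = 'F' ∨ ki.2 = '-' ∨ ki.2 = 'S') ∧ (ki.1, i) ∈ been then "-" else "+"))
  PySem.List.pySetD nb1 (2 * ki.1 + 1)
    (PySem.List.insert (PySem.List.pyGetD nb1 (2 * ki.1 + 1) []) (2 * i + 1) "+")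

-- helper: col = [board[j][i] for j in range(len(board))]
def cwpColA (board : List String) (i : Int) : List Char :=
  (PySem.List.pyRange 0 (board.length : Int) 1).map
    (fun j => (PySem.Str.pyGet? (PySem.List.pyGetD board j "") i).getD ' ')

def clear_wrong_pipes (board : List String) (been : List (Int × Int)) : List (List String) :=
  let new_board := (PySem.List.enumerate board 0).foldl
    (fun nb ir => nb ++ [(cwpRowA been ir.1 ir.2).1] ++ [(cwpRowA been ir.1 ir.2).2]) []
  let stop : Int := PySem.Str.len (PySem.List.pyGetD board 0 "")
  (PySem.List.pyRange 0 stop 1).foldl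
    (fun nb i => (PySem.List.enumerate (cwpColA board i) 0).foldl (cwpStepA been i) nb)
    new_board

-- ===== PORT B =====
def clear_wrong_pipes_alt (board : List String) (been : List (Int × Int)) : List (List String) :=
  let w : Int := PySem.Str.len (PySem.List.pyGetD board 0 "")
  let been_set : PySem.Set (Int × Int) := PySem.Set.ofList been
  (PySem.List.enumerate board 0).foldl
    (fun out ir =>
      let eo := (PySem.List.enumerate ir.2.toList 0).foldl
        (fun eo jv =>
          let eo1 := (eo.1 ++ [if jv.2 ≠ '.' ∧ PySem.Set.contains been_set (ir.1, jv.1) = true then String.mk [jv.2] else "@"],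
                      eo.2 ++ [if ("7F|S".toList.contains jv.2 = true) ∧ PySem.Set.contains been_set (ir.1, jv.1) = true then "|" else "+"])
          if jv.1 < w then
            (eo1.1 ++ [if ("LF-S".toList.contains jv.2 = true) ∧ PySem.Set.contains been_set (ir.1, jv.1) = true then "-" else "+"],
             eo1.2 ++ ["+"])
          else eo1)
        ([], [])
      out ++ [eo.1] ++ [eo.2])
    []

-- ===== PRECONDITION & SPEC =====
-- Pre_ is exactly where A returns normally: A raises IndexError on the empty board (board[0]) and on boards where
-- some row is shorter than row 0 (board[j][i] in the column pass).
def Pre_clear_wrong_pipes (board : List String) (been : List (Int × Int)) : Prop :=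
  board ≠ [] ∧ ∀ r ∈ board, (board.headD "").toList.length ≤ r.toList.length
instance (board : List String) (been : List (Int × Int)) : Decidable (Pre_clear_wrong_pipes board been) := by
  unfold Pre_clear_wrong_pipes; infer_instance
def pvWitness_clear_wrong_pipes : List String × (List (Int × Int)) := (["S.", "7|"], [(0, 0), (1, 0)])

def Spec_clear_wrong_pipes (board : List String) (been : List (Int × Int)) (out : List (List String)) : Prop := out = clear_wrong_pipes_alt board been
instance (board : List String) (been : List (Int × Int)) (out : List (List String)) : Decidable (Spec_clear_wrong_pipes board been out) := by unfold Spec_clear_wrong_pipes; infer_instance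

-- ===== CLAIM (what is proved, stated in full; the proofs are below) =====
def Claim_equal_clear_wrong_pipes : Prop := ∀ (board : List String) (been : List (Int × Int)), Dom_clear_wrong_pipes board been → Pre_clear_wrong_pipes board been → Spec_clear_wrong_pipes board been (clear_wrong_pipes board been)

-- ===== LEMMAS AND PROOFS =====

-- the three per-cell output functions (row i, column j, char v)
def cellF (been : List (Int × Int)) (i j : Int) (v : Char) : String :=
  if v = '.' then "@" else if (i, j) ∈ been then String.mk [v] else "@"
def hsepF (been : List (Int × Int)) (i j : Int) (v : Char) : String :=
  if (v = 'L' ∨ v = 'F' ∨ v = '-' ∨ v = 'S') ∧ (i, j) ∈ been then "-" else "+"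
def vsepF (been : List (Int × Int)) (i j : Int) (v : Char) : String :=
  if (v = '7' ∨ v = 'F' ∨ v = '|' ∨ v = 'S') ∧ (i, j) ∈ been then "|" else "+"

-- a row after the first t columns have received their separator (f = cell output, g = separator output)
def rowInter (f g : Int → Char → String) (t : Nat) (cs : List Char) : List String :=
  ((PySem.List.enumerate cs 0).take t).flatMap (fun jv => [f jv.1 jv.2, g jv.1 jv.2])
  ++ ((PySem.List.enumerate cs 0).drop t).map (fun jv => f jv.1 jv.2)

-- the whole board state after the first t columns of A's second pass
def pairsAt (been : List (Int × Int)) (board : List String) (t : Nat) : List (List String) :=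
  (PySem.List.enumerate board 0).flatMap (fun ir =>
    [rowInter (cellF been ir.1) (hsepF been ir.1) t ir.2.toList,
     rowInter (vsepF been ir.1) (fun _ _ => "+") t ir.2.toList])

lemma foldl_append_two {α β : Type} (l : List α) (f g : α → β) (init : List β) :
    l.foldl (fun acc x => acc ++ [f x] ++ [g x]) init = init ++ l.flatMap (fun x => [f x, g x]) := by
  induction l generalizing init with
  | nil => simp
  | cons x xs ih => rw [List.foldl_cons, ih]; simp

lemma pairfold {α β : Type} (l : List α) (f g : α → β) (t b : List β) :
    l.foldl (fun tb x => (tb.1 ++ [f x], tb.2 ++ [g x])) (t, b) = (t ++ l.map f, b ++ l.map g) := by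
  induction l generalizing t b with
  | nil => simp
  | cons x xs ih => simp [List.foldl_cons, ih]

lemma cwpRowA_eq (been : List (Int × Int)) (i : Int) (row : String) :
    cwpRowA been i row =
      ((PySem.List.enumerate row.toList 0).map (fun jv => cellF been i jv.1 jv.2),
       (PySem.List.enumerate row.toList 0).map (fun jv => vsepF been i jv.1 jv.2)) := by
  simpa [cellF, vsepF] using
    pairfold (PySem.List.enumerate row.toList 0)
      (fun jv => cellF been i jv.1 jv.2) (fun jv => vsepF been i jv.1 jv.2)
      ([] : List String) ([] : List String)

lemma flatMap_two_length {α β : Type} (l : List α) (f g : α → β) :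
    (l.flatMap (fun x => [f x, g x])).length = 2 * l.length := by
  induction l with
  | nil => simp
  | cons x xs ih => simp [ih]; ring

lemma rowInter_decomp (f g : Int → Char → String) (t : Nat) (cs : List Char) (ht : t < cs.length) :
    rowInter f g t cs =
      ((PySem.List.enumerate cs 0).take t).flatMap (fun jv => [f jv.1 jv.2, g jv.1 jv.2])
      ++ f (t : Int) cs[t] :: ((PySem.List.enumerate cs 0).drop (t + 1)).map (fun jv => f jv.1 jv.2) := by
  rw [rowInter, List.drop_eq_getElem_cons (by simp [PySem.List.length_enumerate]; omega), PySem.List.getElem_enumerate]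
  simp

lemma rowInter_succ (f g : Int → Char → String) (t : Nat) (cs : List Char) (ht : t < cs.length) :
    rowInter f g (t + 1) cs =
      ((PySem.List.enumerate cs 0).take t).flatMap (fun jv => [f jv.1 jv.2, g jv.1 jv.2])
      ++ f (t : Int) cs[t] :: g (t : Int) cs[t] :: ((PySem.List.enumerate cs 0).drop (t + 1)).map (fun jv => f jv.1 jv.2) := by
  rw [rowInter, List.take_add_one, List.getElem?_eq_getElem (by simp [PySem.List.length_enumerate]; omega), PySem.List.getElem_enumerate]
  simp

lemma rowInter_insert (f g : Int → Char → String) (t : Nat) (cs : List Char) (ht : t < cs.length) :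
    PySem.List.insert (rowInter f g t cs) (2 * (t : Int) + 1) (g (t : Int) cs[t]) = rowInter f g (t + 1) cs := by
  have hpl : (((PySem.List.enumerate cs 0).take t).flatMap (fun jv => [f jv.1 jv.2, g jv.1 jv.2])).length = 2 * t := by
    rw [flatMap_two_length]; simp [PySem.List.length_enumerate]; omega
  have hcast : (2 * (t : Int) + 1) = ((2 * t + 1 : Nat) : Int) := by push_cast; ring
  rw [rowInter_decomp f g t cs ht, rowInter_succ f g t cs ht, hcast,
      PySem.List.insert_natCast _ _ _ (by simp [hpl]),
      show 2 * t + 1 = (((PySem.List.enumerate cs 0).take t).flatMap (fun jv => [f jv.1 jv.2, g jv.1 jv.2])).length + 1 by omega,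
      List.take_length_add_append, List.drop_length_add_append]
  simp

lemma enumerate_map {α β : Type} (h : α → β) (l : List α) (s : Int) :
    PySem.List.enumerate (l.map h) s = (PySem.List.enumerate l s).map (fun p => (p.1, h p.2)) := by
  induction l generalizing s with
  | nil => simp [PySem.List.enumerate_nil]
  | cons x xs ih => simp [PySem.List.enumerate_cons, ih]

lemma cell_eq (been : List (Int × Int)) (i j : Int) (v : Char) :
    (if v ≠ '.' ∧ PySem.Set.contains (PySem.Set.ofList been) (i, j) = true then String.mk [v] else "@")
    = cellF been i j v := by
  simp only [cellF, PySem.Set.contains_eq_listContains, List.contains_eq_mem, PySem.Set.mem_ofList,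
             decide_eq_true_eq]
  by_cases h1 : v = '.' <;> by_cases h2 : (i, j) ∈ been <;> simp [h1, h2]

lemma hsep_eq (been : List (Int × Int)) (i j : Int) (v : Char) :
    (if ("LF-S".toList.contains v = true) ∧ PySem.Set.contains (PySem.Set.ofList been) (i, j) = true then "-" else "+")
    = hsepF been i j v := by
  simp only [hsepF, PySem.Set.contains_eq_listContains, List.contains_eq_mem, PySem.Set.mem_ofList,
             decide_eq_true_eq]
  refine if_congr (and_congr_left_iff.2 (fun _ => ?_)) rfl rfl
  simp

lemma vsep_eq (been : List (Int × Int)) (i j : Int) (v : Char) :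
    (if ("7F|S".toList.contains v = true) ∧ PySem.Set.contains (PySem.Set.ofList been) (i, j) = true then "|" else "+")
    = vsepF been i j v := by
  simp only [vsepF, PySem.Set.contains_eq_listContains, List.contains_eq_mem, PySem.Set.mem_ofList,
             decide_eq_true_eq]
  refine if_congr (and_congr_left_iff.2 (fun _ => ?_)) rfl rfl
  simp

lemma innerFold (been : List (Int × Int)) (i : Int) :
    ∀ (col : List Char) (pairs : List (List String × List String)) (front : List (List String)) (s : Nat),
    pairs.length = col.length → front.length = 2 * s →
    (PySem.List.enumerate col (s : Int)).foldl (cwpStepA been i) (front ++ pairs.flatMap (fun p => [p.1, p.2]))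
    = front ++ (pairs.zip (PySem.List.enumerate col (s : Int))).flatMap
        (fun q => [PySem.List.insert q.1.1 (2 * i + 1) (hsepF been q.2.1 i q.2.2),
                   PySem.List.insert q.1.2 (2 * i + 1) "+"]) := by
  intro col
  induction col with
  | nil =>
    intro pairs front s hlen hf
    have : pairs = [] := List.eq_nil_of_length_eq_zero (by simpa using hlen)
    subst this
    simp [PySem.List.enumerate_nil]
  | cons c col' ih =>
    intro pairs front s hlen hf
    match pairs with
    | [] => simp at hlen
    | p :: ps =>
      have h2s : (2 * (s : Int)) = ((2 * s : Nat) : Int) := by push_cast; ring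
      rw [PySem.List.enumerate_cons, List.foldl_cons]
      have hstep : cwpStepA been i (front ++ (p :: ps).flatMap (fun p => [p.1, p.2])) ((s : Int), c)
          = (front ++ [PySem.List.insert p.1 (2 * i + 1) (hsepF been (s : Int) i c),
                       PySem.List.insert p.2 (2 * i + 1) "+"]) ++ ps.flatMap (fun p => [p.1, p.2]) := by
        have h2s1' : ((2 * s : Nat) : Int) + 1 = ((2 * s + 1 : Nat) : Int) := by push_cast; ring
        simp only [cwpStepA, h2s, PySem.List.pyGetD_natCast, PySem.List.pySetD_natCast,
                   List.flatMap_cons, List.cons_append, List.nil_append]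
        simp only [h2s1', PySem.List.pyGetD_natCast, PySem.List.pySetD_natCast]
        rw [List.getD_append_right _ _ _ _ (by omega), List.set_append_right _ _ (by omega),
            hf, Nat.sub_self]
        simp only [List.getD_cons_zero, List.set_cons_zero]
        rw [List.getD_append_right _ _ _ _ (by omega), List.set_append_right _ _ (by omega), hf,
            show 2 * s + 1 - 2 * s = 1 by omega]
        simp [hsepF]
      rw [hstep]
      have hs1 : ((s : Int) + 1) = ((s + 1 : Nat) : Int) := by push_cast; ring
      rw [hs1, ih ps _ (s + 1) (by simpa using hlen) (by simp; omega)]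
      simp [List.zip_cons_cons, List.flatMap_cons, List.append_assoc]

lemma colA_eq (board : List String) (i : Int) :
    cwpColA board i = board.map (fun r => ((PySem.Str.pyGet? r i).getD ' ')) := by
  rw [cwpColA]
  conv_rhs => rw [← PySem.List.map_pyGetD_pyRange_zero' board "", List.map_map]
  rfl

lemma outer_fold (been : List (Int × Int)) (board : List String) (n : Nat)
    (hPre : ∀ r ∈ board, n ≤ r.toList.length) (t : Nat) (ht : t ≤ n) :
    (PySem.List.pyRange 0 (t : Int) 1).foldl
      (fun nb i => (PySem.List.enumerate (cwpColA board i) 0).foldl (cwpStepA been i) nb)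
      (pairsAt been board 0)
    = pairsAt been board t := by
  induction t with
  | zero =>
    rw [Nat.cast_zero, PySem.List.pyRange_one_eq_nil le_rfl, List.foldl_nil]
  | succ t ihp =>
    have ht' : t ≤ n := by omega
    rw [show ((t + 1 : Nat) : Int) = (t : Int) + 1 by push_cast; ring,
        PySem.List.pyRange_one_succ_right (by positivity), List.foldl_append, ihp ht',
        List.foldl_cons, List.foldl_nil, colA_eq]
    have hP : pairsAt been board t =
        [] ++ ((PySem.List.enumerate board 0).map (fun ir =>
          (rowInter (cellF been ir.1) (hsepF been ir.1) t ir.2.toList,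
           rowInter (vsepF been ir.1) (fun _ _ => "+") t ir.2.toList))).flatMap (fun p => [p.1, p.2]) := by
      simp [pairsAt, List.flatMap_map]
    rw [hP]
    have hIF := innerFold been (t : Int) (board.map (fun r => (PySem.Str.pyGet? r (t : Int)).getD ' '))
        ((PySem.List.enumerate board 0).map (fun ir =>
          (rowInter (cellF been ir.1) (hsepF been ir.1) t ir.2.toList,
           rowInter (vsepF been ir.1) (fun _ _ => "+") t ir.2.toList))) [] 0
        (by simp [PySem.List.length_enumerate]) rfl
    rw [Nat.cast_zero] at hIF
    rw [hIF, enumerate_map, List.zip_map', List.flatMap_map, List.nil_append]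
    simp only [pairsAt]
    apply List.flatMap_congr
    intro ir hir
    have hmem : ir.2 ∈ board := by
      obtain ⟨k, hk, rfl⟩ := (PySem.List.mem_enumerate_iff _ _ _).1 hir
      exact List.getElem_mem hk
    have hrow : n ≤ ir.2.toList.length := hPre _ hmem
    have htlt : t < ir.2.toList.length := by omega
    have hsel : (PySem.Str.pyGet? ir.2 (t : Int)).getD ' ' = ir.2.toList[t] := by
      simp [List.getElem?_eq_getElem htlt]
    simp only [hsel]
    rw [rowInter_insert (cellF been ir.1) (hsepF been ir.1) t ir.2.toList htlt,
        rowInter_insert (vsepF been ir.1) (fun _ _ => "+") t ir.2.toList htlt]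

lemma pairfold_cond {α β : Type} (l : List α) (f g f2 g2 : α → β) (p : α → Prop) [DecidablePred p]
    (t b : List β) :
    l.foldl (fun tb x =>
        let tb1 := (tb.1 ++ [f x], tb.2 ++ [g x])
        if p x then (tb1.1 ++ [f2 x], tb1.2 ++ [g2 x]) else tb1) (t, b)
    = (t ++ l.flatMap (fun x => if p x then [f x, f2 x] else [f x]),
       b ++ l.flatMap (fun x => if p x then [g x, g2 x] else [g x])) := by
  induction l generalizing t b with
  | nil => simp
  | cons x xs ih =>
    rw [List.foldl_cons]
    by_cases h : p x
    · rw [show (let tb1 := ((t, b).1 ++ [f x], (t, b).2 ++ [g x])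
            if p x then (tb1.1 ++ [f2 x], tb1.2 ++ [g2 x]) else tb1)
          = (t ++ [f x] ++ [f2 x], b ++ [g x] ++ [g2 x]) from by simp [h], ih]
      simp [h, List.append_assoc]
    · rw [show (let tb1 := ((t, b).1 ++ [f x], (t, b).2 ++ [g x])
            if p x then (tb1.1 ++ [f2 x], tb1.2 ++ [g2 x]) else tb1)
          = (t ++ [f x], b ++ [g x]) from by simp [h], ih]
      simp [h, List.append_assoc]

-- a fully separator-filled row, written as B writes it (separator for the first w columns only)
lemma rowInter_cond (f g : Int → Char → String) (w : Nat) (cs : List Char) (_hw : w ≤ cs.length) :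
    rowInter f g w cs =
      (PySem.List.enumerate cs 0).flatMap
        (fun jv => if jv.1 < (w : Int) then [f jv.1 jv.2, g jv.1 jv.2] else [f jv.1 jv.2]) := by
  rw [rowInter, ← List.take_append_drop w (PySem.List.enumerate cs 0), List.flatMap_append]
  have h1 : ∀ jv ∈ (PySem.List.enumerate cs 0).take w,
      (if jv.1 < (w : Int) then [f jv.1 jv.2, g jv.1 jv.2] else [f jv.1 jv.2]) = [f jv.1 jv.2, g jv.1 jv.2] := by
    intro jv hjv
    obtain ⟨k, hk, hkl, rfl⟩ := List.mem_take_iff_getElem.1 hjv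
    rw [PySem.List.getElem_enumerate]
    have hkw : k < w := lt_of_lt_of_le hk (Nat.min_le_left _ _)
    have hki : ((k : Nat) : Int) < (w : Int) := by exact_mod_cast hkw
    simp [hki]
  have h2 : ∀ jv ∈ (PySem.List.enumerate cs 0).drop w,
      (if jv.1 < (w : Int) then [f jv.1 jv.2, g jv.1 jv.2] else [f jv.1 jv.2]) = [f jv.1 jv.2] := by
    intro jv hjv
    rw [List.mem_iff_getElem] at hjv
    obtain ⟨k, hk, rfl⟩ := hjv
    rw [List.getElem_drop, PySem.List.getElem_enumerate]
    have hki : ¬ (((w + k : Nat) : Int) < (w : Int)) := by push_cast; omega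
    simp [hki]
  rw [List.flatMap_congr h1, List.flatMap_congr h2]
  congr 1
  · rw [List.take_append_drop]
  · simp [← List.map_drop, List.map_eq_flatMap]

lemma alt_eq (board : List String) (been : List (Int × Int)) :
    clear_wrong_pipes_alt board been =
      (PySem.List.enumerate board 0).flatMap (fun ir =>
        [(PySem.List.enumerate ir.2.toList 0).flatMap
           (fun jv => if jv.1 < PySem.Str.len (PySem.List.pyGetD board 0 "")
                      then [cellF been ir.1 jv.1 jv.2, hsepF been ir.1 jv.1 jv.2]
                      else [cellF been ir.1 jv.1 jv.2]),
         (PySem.List.enumerate ir.2.toList 0).flatMap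
           (fun jv => if jv.1 < PySem.Str.len (PySem.List.pyGetD board 0 "")
                      then [vsepF been ir.1 jv.1 jv.2, "+"]
                      else [vsepF been ir.1 jv.1 jv.2])]) := by
  simp only [clear_wrong_pipes_alt]
  rw [foldl_append_two, List.nil_append]
  apply List.flatMap_congr
  intro ir _
  rw [pairfold_cond, List.nil_append, List.nil_append]
  simp only [cell_eq, hsep_eq, vsep_eq]

-- ===== VERDICT (by name: the statement is the Claim_ definition above) =====
theorem clear_wrong_pipes_spec : Claim_equal_clear_wrong_pipes := by
  intro board been _ hPre
  obtain ⟨hne, hall⟩ := hPre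
  unfold Spec_clear_wrong_pipes
  simp only [clear_wrong_pipes]
  rw [foldl_append_two, List.nil_append]
  have h0 : (PySem.List.enumerate board 0).flatMap
      (fun ir => [(cwpRowA been ir.1 ir.2).1, (cwpRowA been ir.1 ir.2).2]) = pairsAt been board 0 := by
    simp only [pairsAt]
    apply List.flatMap_congr
    intro ir _
    rw [cwpRowA_eq]
    simp [rowInter]
  have hstop : PySem.Str.len (PySem.List.pyGetD board 0 "") = ((board.headD "").toList.length : Int) := by
    cases board with
    | nil => exact absurd rfl hne
    | cons r rest => simp [PySem.List.pyGetD_zero_cons, PySem.Str.len_eq]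
  rw [h0, hstop, outer_fold been board _ hall _ le_rfl, alt_eq]
  simp only [pairsAt, hstop]
  apply List.flatMap_congr
  intro ir hir
  have hmem : ir.2 ∈ board := by
    obtain ⟨k, hk, rfl⟩ := (PySem.List.mem_enumerate_iff _ _ _).1 hir
    exact List.getElem_mem hk
  have hw : (board.headD "").toList.length ≤ ir.2.toList.length := hall _ hmem
  rw [rowInter_cond _ _ _ _ hw, rowInter_cond _ _ _ _ hw]
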